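-- pv_equiv track=rewrite | github.com/cryskram/imllab | candidate.py | candidate_elimination
-- ===== SOURCE A (Python) =====
-- def candidate_elimination(concepts, target):
--     s = concepts[0].copy()
--     g = ["?" * len(s)]
--
--     for i, h in enumerate(concepts):
--         if target[i].lower() == "yes":
--             s = ["?" if s[j] != h[j] else s[j] for j in range(len(s))]
--         else:
--             g = [
--                 gen
--                 for gen in g
--                 if all(gen[j] == "?" or gen[j] != h[j] for j in range(len(s)))
--             ]
--
--     return [s], g
-- ===== SOURCE B (Python) =====
-- def candidate_elimination(concepts, target):
--     base = concepts[0]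
--     n = len(base)
--     positives = [h for h, t in zip(concepts, target) if t.lower() == "yes"]
--     s = [base[j] if all(h[j] == base[j] for h in positives) else "?" for j in range(n)]
--     return [s], ["?" * n]
-- ===== Notes on version B (the rewrite author's own statement) =====
-- stated objective: simpler
-- what changed: Replaces A's per-example state-updating loop (and its vacuous general-boundary filter, which never removes anything) by a single column-wise comprehension over attribute indices comparing every positive example to concepts[0], and emits g directly as the constant all-'?' hypothesis.
import Mathlib
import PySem

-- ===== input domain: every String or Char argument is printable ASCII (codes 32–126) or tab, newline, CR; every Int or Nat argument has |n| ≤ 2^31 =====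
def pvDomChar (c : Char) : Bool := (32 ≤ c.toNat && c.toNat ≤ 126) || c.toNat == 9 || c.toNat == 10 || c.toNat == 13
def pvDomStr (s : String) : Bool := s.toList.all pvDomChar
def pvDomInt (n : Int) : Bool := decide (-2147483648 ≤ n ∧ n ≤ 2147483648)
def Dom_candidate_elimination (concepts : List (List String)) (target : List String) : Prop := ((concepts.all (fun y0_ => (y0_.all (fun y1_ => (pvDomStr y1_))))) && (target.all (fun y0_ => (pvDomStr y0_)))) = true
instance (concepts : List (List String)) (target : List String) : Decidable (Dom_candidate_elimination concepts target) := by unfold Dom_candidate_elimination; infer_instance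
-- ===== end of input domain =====

-- B replaces A's per-example state-updating loop (whose negative branch never filters anything) by a
-- column-wise comparison of the positive examples against concepts[0]; objective: simpler.


-- "?" * n (Python string repetition; PySem has no Str repeat primitive — exact for the count n ≥ 0 that occurs here)
def pvQmarks (n : Nat) : String := String.ofList (List.replicate n '?')

-- ===== PORT A =====
-- one iteration of A's loop: i = ih.1, h = ih.2; target[i] is total here (pyGetD) — i is in range under Pre_
def ceStepA (target : List String) (acc : List String × List String) (ih : Int × List String) :
    List String × List String :=
  if PySem.Str.lower (PySem.List.pyGetD target ih.1 "") = "yes" then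
    ((PySem.List.pyRange 0 (acc.1.length : Int) 1).map (fun j =>
        if PySem.List.pyGetD acc.1 j "" ≠ PySem.List.pyGetD ih.2 j "" then "?"
        else PySem.List.pyGetD acc.1 j ""),
     acc.2)
  else
    (acc.1,
     acc.2.filter (fun gen =>
       (PySem.List.pyRange 0 (acc.1.length : Int) 1).all (fun j =>
         (PySem.Str.pyGet? gen j == some '?') ||
           !((PySem.Str.pyGet? gen j).map (fun c => String.ofList [c]) == PySem.List.pyGet? ih.2 j))))

def candidate_elimination (concepts : List (List String)) (target : List String) :
    List (List String) × List String :=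
  let s := (PySem.List.pyGet? concepts 0).getD []    -- concepts[0].copy(); none = IndexError, excluded by Pre_
  let g := [pvQmarks s.length]                        -- ["?" * len(s)]
  let r := (PySem.List.enumerate concepts 0).foldl (ceStepA target) (s, g)
  ([r.1], r.2)

-- ===== PORT B =====
def candidate_elimination_alt (concepts : List (List String)) (target : List String) :
    List (List String) × List String :=
  let base := (PySem.List.pyGet? concepts 0).getD []  -- concepts[0]; none = IndexError, excluded by Pre_
  let positives := ((concepts.zip target).filter (fun ht => PySem.Str.lower ht.2 = "yes")).map (fun ht => ht.1)
  let s := (PySem.List.pyRange 0 (base.length : Int) 1).map (fun j =>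
    if positives.all (fun h => PySem.List.pyGetD h j "" == PySem.List.pyGetD base j "") then
      PySem.List.pyGetD base j ""
    else "?")
  ([s], [pvQmarks base.length])

-- ===== PRECONDITION & SPEC =====
-- Pre_ excludes exactly the inputs where Python A raises IndexError: empty concepts, a target shorter
-- than concepts, or a positive example shorter than concepts[0].
def Pre_candidate_elimination (concepts : List (List String)) (target : List String) : Prop :=
  concepts ≠ [] ∧ concepts.length ≤ target.length ∧
    ∀ ht ∈ concepts.zip target, PySem.Str.lower ht.2 = "yes" → concepts.headI.length ≤ ht.1.length
instance (concepts : List (List String)) (target : List String) : Decidable (Pre_candidate_elimination concepts target) := by unfold Pre_candidate_elimination; infer_instance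

def pvWitness_candidate_elimination : List (List String) × List String :=
  ([["sunny", "warm"], ["rainy", "warm"]], ["yes", "no"])

def Spec_candidate_elimination (concepts : List (List String)) (target : List String) (out : List (List String) × List String) : Prop := out = candidate_elimination_alt concepts target
instance (concepts : List (List String)) (target : List String) (out : List (List String) × List String) : Decidable (Spec_candidate_elimination concepts target out) := by unfold Spec_candidate_elimination; infer_instance

-- ===== CLAIM (what is proved, stated in full; the proofs are below) =====
def Claim_equal_candidate_elimination : Prop := ∀ (concepts : List (List String)) (target : List String), Dom_candidate_elimination concepts target → Pre_candidate_elimination concepts target → Spec_candidate_elimination concepts target (candidate_elimination concepts target)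

-- ===== LEMMAS AND PROOFS =====

-- A's loop step with the pair's own target value in place of target[i]
def ceStepZ (acc : List String × List String) (ht : List String × String) :
    List String × List String :=
  if PySem.Str.lower ht.2 = "yes" then
    ((PySem.List.pyRange 0 (acc.1.length : Int) 1).map (fun j =>
        if PySem.List.pyGetD acc.1 j "" ≠ PySem.List.pyGetD ht.1 j "" then "?"
        else PySem.List.pyGetD acc.1 j ""),
     acc.2)
  else
    (acc.1,
     acc.2.filter (fun gen =>
       (PySem.List.pyRange 0 (acc.1.length : Int) 1).all (fun j =>
         (PySem.Str.pyGet? gen j == some '?') ||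
           !((PySem.Str.pyGet? gen j).map (fun c => String.ofList [c]) == PySem.List.pyGet? ht.1 j))))

-- the column-wise result B computes
def colS (base : List String) (hs : List (List String)) : List String :=
  (PySem.List.pyRange 0 (base.length : Int) 1).map (fun j =>
    if hs.all (fun h => PySem.List.pyGetD h j "" == PySem.List.pyGetD base j "") then
      PySem.List.pyGetD base j ""
    else "?")

def posOf (pairs : List (List String × String)) : List (List String) :=
  (pairs.filter (fun ht => PySem.Str.lower ht.2 = "yes")).map (fun ht => ht.1)

lemma ceStepA_eq_Z (target : List String) (acc : List String × List String) (i : Int) (h : List String) :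
    ceStepA target acc (i, h) = ceStepZ acc (h, PySem.List.pyGetD target i "") := rfl

lemma ce_enum_to_zip (target : List String) :
    ∀ (cs : List (List String)) (k : Nat) (acc : List String × List String),
      cs.length + k ≤ target.length →
      (PySem.List.enumerate cs (k : Int)).foldl (ceStepA target) acc
        = (cs.zip (target.drop k)).foldl ceStepZ acc := by
  intro cs
  induction cs with
  | nil => intro k acc _; simp [PySem.List.enumerate_nil]
  | cons c cs ih =>
    intro k acc hk
    obtain ⟨t, ts', hdk⟩ : ∃ t ts', target.drop k = t :: ts' := by
      have : (target.drop k).length > 0 := by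
        simp only [List.length_drop]; simp at hk ⊢; omega
      exact List.exists_cons_of_ne_nil (by intro h; rw [h] at this; simp at this)
    have ht : PySem.List.pyGetD target (k : Int) "" = t := by
      have h1 : target[k]? = some t := by
        have := List.getElem?_drop (xs:=target) (i:=k) (j:=0)
        rw [hdk] at this; simpa using this.symm
      simp [PySem.List.pyGetD_natCast, List.getD, h1]
    have hdk1 : target.drop (k + 1) = ts' := by
      have : target.drop (k+1) = (target.drop k).drop 1 := by rw [List.drop_drop]
      rw [this, hdk]; simp
    rw [PySem.List.enumerate_cons, List.foldl_cons, hdk, List.zip_cons_cons, List.foldl_cons,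
      ceStepA_eq_Z, ht]
    have hcast : (k : Int) + 1 = ((k + 1 : Nat) : Int) := by push_cast; ring
    rw [hcast, ih (k+1) _ (by simp at hk; omega), hdk1]

lemma ce_fold_zip :
    ∀ (pairs : List (List String × String)) (s : List String) (n : Nat), s.length = n →
      pairs.foldl ceStepZ (s, [pvQmarks n]) = (colS s (posOf pairs), [pvQmarks n]) := by
  intro pairs
  induction pairs with
  | nil =>
    intro s n hn
    subst hn
    simp only [List.foldl_nil, colS, posOf, List.filter_nil, List.map_nil, List.all_nil, if_true]
    rw [PySem.List.map_pyGetD_pyRange_zero']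
  | cons p rest ih =>
    intro s n hn
    rw [List.foldl_cons]
    by_cases hy : PySem.Str.lower p.2 = "yes"
    · have hstep : ceStepZ (s, [pvQmarks n]) p =
          ((PySem.List.pyRange 0 (s.length : Int) 1).map (fun j =>
            if PySem.List.pyGetD s j "" ≠ PySem.List.pyGetD p.1 j "" then "?"
            else PySem.List.pyGetD s j ""), [pvQmarks n]) := by
        simp [ceStepZ, hy]
      rw [hstep]
      set s' := (PySem.List.pyRange 0 (s.length : Int) 1).map (fun j =>
            if PySem.List.pyGetD s j "" ≠ PySem.List.pyGetD p.1 j "" then "?"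
            else PySem.List.pyGetD s j "") with hs'
      have hlen' : s'.length = s.length := by
        rw [hs', List.length_map, PySem.List.length_pyRange_one]; simp
      rw [ih s' n (by rw [hlen', hn])]
      have hpos : posOf (p :: rest) = p.1 :: posOf rest := by simp [posOf, hy]
      rw [hpos]
      unfold colS
      rw [hlen']
      congr 1
      apply List.map_congr_left
      intro j hj
      obtain ⟨hj0, hjlt⟩ := (PySem.List.mem_pyRange_one).1 hj
      have hsj : PySem.List.pyGetD s' j "" =
          if PySem.List.pyGetD s j "" ≠ PySem.List.pyGetD p.1 j "" then "?"
          else PySem.List.pyGetD s j "" :=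
        PySem.List.pyGetD_map_pyRange_of_nonneg _ _ _ _ hj0 hjlt
      by_cases heq : PySem.List.pyGetD s j "" = PySem.List.pyGetD p.1 j ""
      · rw [hsj]
        simp [heq]
      · have hne' : ¬ PySem.List.pyGetD p.1 j "" = PySem.List.pyGetD s j "" :=
          fun h => heq h.symm
        rw [hsj]
        simp [heq, hne']
    · have hq : ((PySem.List.pyRange 0 (s.length : Int) 1).all (fun j =>
          (PySem.Str.pyGet? (pvQmarks n) j == some '?') ||
            !((PySem.Str.pyGet? (pvQmarks n) j).map (fun c => String.ofList [c]) ==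
              PySem.List.pyGet? p.1 j))) = true := by
        rw [List.all_eq_true]
        intro j hj
        obtain ⟨hj0, hjlt⟩ := (PySem.List.mem_pyRange_one).1 hj
        obtain ⟨k, rfl⟩ := Int.eq_ofNat_of_zero_le hj0
        have hqk : PySem.Str.pyGet? (pvQmarks n) (k : Int) = some '?' := by
          rw [PySem.Str.pyGet?_natCast]
          simp only [pvQmarks, String.toList_ofList]
          rw [List.getElem?_replicate]
          simp only [hn] at hjlt
          simp [(by exact_mod_cast hjlt : k < n)]
        simp only [PySem.Str.pyGet?_natCast] at hqk
        simp [hqk]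
      have hstep : ceStepZ (s, [pvQmarks n]) p = (s, [pvQmarks n]) := by
        simp only [ceStepZ, if_neg hy]
        rw [List.filter_cons_of_pos (by exact hq), List.filter_nil]
      rw [hstep, ih s n hn]
      have hpos : posOf (p :: rest) = posOf rest := by simp [posOf, hy]
      rw [hpos]

-- ===== VERDICT (by name: the statement is the Claim_ definition above) =====
theorem candidate_elimination_spec : Claim_equal_candidate_elimination := by
  intro concepts target _hdom hpre
  obtain ⟨hne, hlen, -⟩ := hpre
  show _ = _
  unfold candidate_elimination candidate_elimination_alt
  dsimp only
  have h0 : ((0 : Nat) : Int) = (0 : Int) := by norm_num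
  rw [← h0, ce_enum_to_zip target concepts 0 _ (by omega)]
  rw [List.drop_zero]
  rw [ce_fold_zip (concepts.zip target) _ _ rfl]
  rfl
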